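-- pv_equiv track=rewrite | github.com/pcomi/PYTHON | homework2.py | Stadium
-- ===== SOURCE A (Python) =====
-- def Stadium(matrix):
--     result = []
--     rows = len(matrix)
--     cols = len(matrix[0])
--
--     for col in range(cols):
--         maximum = -1
--         for row in range(rows):
--             if matrix[row][col] <= maximum:
--                 result.append((row, col))
--             else:
--                 maximum = matrix[row][col]
--     return result
-- ===== SOURCE B (Python) =====
-- def Stadium(matrix):
--     rows = len(matrix)
--     cols = len(matrix[0])
--     result = []
--     for col in range(cols):
--         column = [matrix[row][col] for row in range(rows)]
--         pm = [-1]
--         for v in column: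
--             pm.append(max(pm[-1], v))
--         result.extend((row, col) for row in range(rows) if column[row] <= pm[row])
--     return result
-- ===== Notes on version B (the rewrite author's own statement) =====
-- stated objective: alternative
-- what changed: A's single interleaved mutate-and-test loop per column is replaced by a two-pass decomposition: first build the column and its prefix-maximum table pm (with the -1 sentinel), then a separate filter pass emits (row, col) where column[row] <= pm[row].
import Mathlib
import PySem

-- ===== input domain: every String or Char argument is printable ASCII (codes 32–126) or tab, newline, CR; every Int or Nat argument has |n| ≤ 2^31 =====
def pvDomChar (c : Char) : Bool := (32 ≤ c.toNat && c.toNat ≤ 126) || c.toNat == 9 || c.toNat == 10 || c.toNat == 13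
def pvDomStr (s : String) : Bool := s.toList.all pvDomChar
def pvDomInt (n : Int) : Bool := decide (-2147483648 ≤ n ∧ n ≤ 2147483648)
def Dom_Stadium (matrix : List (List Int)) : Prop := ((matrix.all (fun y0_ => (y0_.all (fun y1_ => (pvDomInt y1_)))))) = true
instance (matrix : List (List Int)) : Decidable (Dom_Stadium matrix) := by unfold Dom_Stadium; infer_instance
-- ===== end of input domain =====

-- B replaces A's interleaved running-max-and-test loop per column by two passes: build the
-- column's prefix-maximum table, then filter rows against it (alternative decomposition, same cost).

-- ===== PORT A =====
def Stadium (matrix : List (List Int)) : List (Int × Int) :=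
  let rows : Int := matrix.length
  let cols : Int := (PySem.List.pyGetD matrix 0 []).length
  (PySem.List.pyRange 0 cols 1).foldl (fun res col =>
    ((PySem.List.pyRange 0 rows 1).foldl (fun (st : List (Int × Int) × Int) row =>
      let v := PySem.List.pyGetD (PySem.List.pyGetD matrix row []) col 0
      if v ≤ st.2 then (st.1 ++ [(row, col)], st.2) else (st.1, v))
      (res, (-1 : Int))).1) []

-- ===== PORT B =====
def Stadium_alt (matrix : List (List Int)) : List (Int × Int) :=
  let rows : Int := matrix.length
  let cols : Int := (PySem.List.pyGetD matrix 0 []).length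
  (PySem.List.pyRange 0 cols 1).foldl (fun res col =>
    let column := (PySem.List.pyRange 0 rows 1).map (fun row =>
      PySem.List.pyGetD (PySem.List.pyGetD matrix row []) col 0)
    let pm := column.foldl (fun acc v => acc ++ [max (acc.getLastD (-1)) v]) [(-1 : Int)]
    res ++ ((PySem.List.pyRange 0 rows 1).filter (fun row =>
      decide (PySem.List.pyGetD column row 0 ≤ PySem.List.pyGetD pm row 0))).map
      (fun row => (row, col))) []

-- ===== PRECONDITION & SPEC =====
-- Pre_ excludes exactly the inputs on which A raises IndexError: the empty matrix (matrix[0])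
-- and ragged matrices where some row is shorter than the first row (matrix[row][col]).
def Pre_Stadium (matrix : List (List Int)) : Prop :=
  matrix ≠ [] ∧ ∀ r ∈ matrix, matrix.headI.length ≤ r.length
instance (matrix : List (List Int)) : Decidable (Pre_Stadium matrix) := by unfold Pre_Stadium; infer_instance
def pvWitness_Stadium : List (List Int) := [[1, 2], [0, 3], [2, 1]]
def Spec_Stadium (matrix : List (List Int)) (out : List (Int × Int)) : Prop := out = Stadium_alt matrix
instance (matrix : List (List Int)) (out : List (Int × Int)) : Decidable (Spec_Stadium matrix out) := by unfold Spec_Stadium; infer_instance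

-- ===== CLAIM (what is proved, stated in full; the proofs are below) =====
def Claim_equal_Stadium : Prop := ∀ (matrix : List (List Int)), Dom_Stadium matrix → Pre_Stadium matrix → Spec_Stadium matrix (Stadium matrix)

-- ===== LEMMAS AND PROOFS =====

-- running column maximum after the first n rows (-1 sentinel at n = 0)
def pmax (v : Nat → Int) : Nat → Int
  | 0 => -1
  | n + 1 => max (pmax v n) (v n)

-- the cells emitted for one column among the first n rows
def hits (v : Nat → Int) (col : Int) (n : Nat) : List (Int × Int) :=
  ((List.range n).filter (fun k => decide (v k ≤ pmax v k))).map (fun k : Nat => ((k : Int), col))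

-- A's inner loop computes the hit list and the running maximum = prefix maximum
theorem innerA_eq (f : Int → Int) (col : Int) (n : Nat) (res : List (Int × Int)) :
    ((PySem.List.pyRange 0 (n : Int) 1).foldl (fun (st : List (Int × Int) × Int) row =>
      if f row ≤ st.2 then (st.1 ++ [(row, col)], st.2) else (st.1, f row))
      (res, (-1 : Int))) = (res ++ hits (fun k => f (k : Int)) col n, pmax (fun k => f (k : Int)) n) := by
  induction n with
  | zero => simp [PySem.List.pyRange_one_eq_nil, hits, pmax]
  | succ n ih =>
    have h : ((n : Int) + 1) = ((n + 1 : Nat) : Int) := by push_cast; ring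
    rw [← h, PySem.List.pyRange_one_succ_right (by positivity), List.foldl_append, ih]
    simp only [List.foldl_cons, List.foldl_nil, hits, pmax, List.range_succ, List.filter_append,
      List.filter_cons, List.filter_nil]
    by_cases hc : f (n : Int) ≤ pmax (fun k => f (k : Int)) n
    · simp [hc, List.append_assoc]
    · simp [hc, max_eq_right (le_of_lt (lt_of_not_ge hc))]

-- B's table-building pass produces the prefix-maximum table
theorem pm_eq (v : Nat → Int) (n : Nat) :
    ((List.range n).map v).foldl (fun acc x => acc ++ [max (acc.getLastD (-1)) x]) [(-1 : Int)]
      = (List.range (n + 1)).map (pmax v) := by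
  induction n with
  | zero => rfl
  | succ n ih =>
    rw [List.range_succ, List.map_append, List.foldl_append, ih]
    have : ((List.range (n + 1)).map (pmax v)).getLastD (-1) = pmax v n := by
      rw [List.range_succ, List.map_append]; exact List.getLastD_concat
    simp only [List.map_cons, List.map_nil, List.foldl_cons, List.foldl_nil, this]
    rw [List.range_succ (n := n + 1), List.map_append]
    rfl

-- per column, A's step and B's step agree for every accumulator
theorem col_step (matrix : List (List Int)) (col : Int) (res : List (Int × Int)) :
    ((PySem.List.pyRange 0 (matrix.length : Int) 1).foldl (fun (st : List (Int × Int) × Int) row =>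
      let v := PySem.List.pyGetD (PySem.List.pyGetD matrix row []) col 0
      if v ≤ st.2 then (st.1 ++ [(row, col)], st.2) else (st.1, v))
      (res, (-1 : Int))).1
    = (let column := (PySem.List.pyRange 0 (matrix.length : Int) 1).map (fun row =>
        PySem.List.pyGetD (PySem.List.pyGetD matrix row []) col 0)
      let pm := column.foldl (fun acc v => acc ++ [max (acc.getLastD (-1)) v]) [(-1 : Int)]
      res ++ ((PySem.List.pyRange 0 (matrix.length : Int) 1).filter (fun row =>
        decide (PySem.List.pyGetD column row 0 ≤ PySem.List.pyGetD pm row 0))).map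
        (fun row => (row, col))) := by
  set f : Int → Int := fun row => PySem.List.pyGetD (PySem.List.pyGetD matrix row []) col 0 with hf
  set n := matrix.length with hn
  set vN : Nat → Int := fun k => f (k : Int) with hv
  rw [innerA_eq f col n res]
  simp only
  congr 1
  have hcol : (PySem.List.pyRange 0 (n : Int) 1).map f = (List.range n).map vN := by
    rw [PySem.List.pyRange_zero_nat, List.map_map]; rfl
  rw [hcol, pm_eq vN n, PySem.List.pyRange_zero_nat, List.filter_map, List.map_map]
  unfold hits
  have : ∀ k ∈ List.range n,
      ((fun row => decide (PySem.List.pyGetD ((List.range n).map vN) row 0 ≤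
        PySem.List.pyGetD ((List.range (n+1)).map (pmax vN)) row 0)) ∘ (fun k : Nat => (k : Int))) k
      = decide (vN k ≤ pmax vN k) := by
    intro k hk
    have hk' : k < n := List.mem_range.mp hk
    simp only [Function.comp, PySem.List.pyGetD_natCast,
      PySem.List.getD_map_range _ _ _ _ hk', PySem.List.getD_map_range _ _ _ _ (Nat.lt_succ_of_lt hk')]
  rw [List.filter_congr this]
  rfl

-- ===== VERDICT (by name: the statement is the Claim_ definition above) =====
theorem Stadium_spec : Claim_equal_Stadium := by
  intro matrix _ _
  unfold Spec_Stadium Stadium Stadium_alt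
  simp only
  apply PySem.List.foldl_congr_mem
  intro acc col _
  exact col_step matrix col acc
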